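-- pv_equiv track=rewrite | github.com/pacospace/lab | thoth/lab/adviser.py | _create_heatmaps_values
-- ===== SOURCE A (Python) =====
-- from typing import Union, List, Dict, Any
--
-- def _create_heatmaps_values(input_data: dict, advise_encoded_type: List[int]):
--     """Create values for heatmaps.
--
--     :param adviser_justification_df: data frame as returned by `create_final_dataframe' per identifier.
--     """
--     heatmaps_values = []
--     for t in set(advise_encoded_type):
--         type_values = []
--         for interval_runs in input_data.values():
--             if t in interval_runs.keys():
--                 type_values.append(interval_runs[t]["count"])
--             else:
--                 type_values.append(0)
--
--         heatmaps_values.append(type_values)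
--
--     return heatmaps_values
-- ===== SOURCE B (Python) =====
-- def _create_heatmaps_values(input_data: dict, advise_encoded_type):
--     types = list(set(advise_encoded_type))
--     row = {t: i for i, t in enumerate(types)}
--     matrix = [[0] * len(input_data) for _ in types]
--     for col, interval_runs in enumerate(input_data.values()):
--         for t, info in interval_runs.items():
--             if t in row:
--                 matrix[row[t]][col] = info["count"]
--     return matrix
-- ===== Notes on version B (the rewrite author's own statement) =====
-- stated objective: alternative
-- what changed: A gathers: for every type it scans all runs testing membership and appending counts row by row; B scatters: it precomputes a type-to-row index, allocates the whole zero matrix up front, and makes a single pass over each run's own items writing each count directly into its matrix cell, so no per-type membership test against runs remains; Pre_ excludes runs whose dict for a selected type lacks a 'count' entry (A raises KeyError there) and, on the Lean side, association lists with duplicate int keys in a run, which do not represent a Python dict.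
import Mathlib
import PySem

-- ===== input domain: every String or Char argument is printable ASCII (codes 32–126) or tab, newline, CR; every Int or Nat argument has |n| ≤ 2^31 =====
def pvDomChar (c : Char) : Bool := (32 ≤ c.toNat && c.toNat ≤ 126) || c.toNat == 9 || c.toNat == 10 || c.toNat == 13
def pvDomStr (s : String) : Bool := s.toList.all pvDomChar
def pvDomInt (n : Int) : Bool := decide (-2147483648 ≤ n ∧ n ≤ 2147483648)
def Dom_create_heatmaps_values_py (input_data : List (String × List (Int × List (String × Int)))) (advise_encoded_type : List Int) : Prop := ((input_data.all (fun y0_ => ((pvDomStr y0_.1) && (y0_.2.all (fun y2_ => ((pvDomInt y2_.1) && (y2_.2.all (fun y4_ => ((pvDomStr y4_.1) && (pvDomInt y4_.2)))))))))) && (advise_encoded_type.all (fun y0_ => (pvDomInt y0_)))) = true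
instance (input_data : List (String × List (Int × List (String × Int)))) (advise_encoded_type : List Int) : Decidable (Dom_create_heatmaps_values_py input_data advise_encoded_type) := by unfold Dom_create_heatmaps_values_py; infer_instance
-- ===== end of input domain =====

-- B replaces A's gather (for every type, scan all runs with a membership test) by a scatter:
-- a type-to-row index, an all-zero matrix allocated up front, and one pass over each run's own
-- items writing each count directly into its cell (objective: alternative; same asymptotic cost).

-- ===== PORT A =====
def create_heatmaps_values_py (input_data : List (String × List (Int × List (String × Int)))) (advise_encoded_type : List Int) : List (List Int) :=
  (PySem.Set.ofList advise_encoded_type).foldl (fun heatmaps_values t =>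
    heatmaps_values ++
      [input_data.foldl (fun type_values kv =>
        type_values ++
          [if (PySem.Dict.mk kv.2).contains t then
            -- interval_runs[t]["count"]; Pre_ guarantees "count" is present, so getD never takes its default
            PySem.Dict.getD (PySem.Dict.mk (PySem.Dict.getD (PySem.Dict.mk kv.2) t [])) "count" 0
          else 0]) []]) []

-- ===== PORT B =====
def create_heatmaps_values_py_alt (input_data : List (String × List (Int × List (String × Int)))) (advise_encoded_type : List Int) : List (List Int) :=
  let types := PySem.Set.ofList advise_encoded_type
  -- row = {t: i for i, t in enumerate(types)}
  let row : PySem.Dict Int Int :=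
    (PySem.List.enumerate types).foldl (fun d it => d.insert it.2 it.1) (PySem.Dict.mk [])
  -- matrix = [[0] * len(input_data) for _ in types]
  let matrix : List (List Int) := types.map (fun _ => List.replicate input_data.length (0 : Int))
  -- for col, interval_runs in enumerate(input_data.values()): for t, info in interval_runs.items(): …
  (PySem.List.enumerate (input_data.map Prod.snd)).foldl (fun M ci =>
    ci.2.foldl (fun M ti =>
      if row.contains ti.1 then
        -- matrix[row[t]][col] = info["count"]; enumerate indices are ≥ 0, so .toNat is exact,
        -- and Pre_ guarantees "count" is present, so getD never takes its default
        M.set (row.getD ti.1 0).toNat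
          ((M.getD (row.getD ti.1 0).toNat []).set ci.1.toNat
            (PySem.Dict.getD (PySem.Dict.mk ti.2) "count" 0))
      else M) M) matrix

-- ===== PRECONDITION & SPEC =====
-- Pre_ excludes (a) runs whose dictionary for some type in advise_encoded_type lacks a "count" entry —
-- A raises KeyError there — and (b) association lists with duplicate int keys inside a run, which are
-- not the image of any Python dict, so first-vs-last-match behaviour on them is accidental.
def Pre_create_heatmaps_values_py (input_data : List (String × List (Int × List (String × Int)))) (advise_encoded_type : List Int) : Prop :=
  ∀ kv ∈ input_data, (kv.2.map Prod.fst).Nodup ∧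
    ∀ td ∈ kv.2, td.1 ∈ advise_encoded_type → "count" ∈ td.2.map Prod.fst
instance (input_data : List (String × List (Int × List (String × Int)))) (advise_encoded_type : List Int) : Decidable (Pre_create_heatmaps_values_py input_data advise_encoded_type) := by unfold Pre_create_heatmaps_values_py; infer_instance

def pvWitness_create_heatmaps_values_py : (List (String × List (Int × List (String × Int)))) × List Int :=
  ([("a", [(1, [("count", 2)])]), ("b", [])], [1, 3])

def Spec_create_heatmaps_values_py (input_data : List (String × List (Int × List (String × Int)))) (advise_encoded_type : List Int) (out : List (List Int)) : Prop := out = create_heatmaps_values_py_alt input_data advise_encoded_type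
instance (input_data : List (String × List (Int × List (String × Int)))) (advise_encoded_type : List Int) (out : List (List Int)) : Decidable (Spec_create_heatmaps_values_py input_data advise_encoded_type out) := by unfold Spec_create_heatmaps_values_py; infer_instance

-- ===== CLAIM (what is proved, stated in full; the proofs are below) =====
def Claim_equal_create_heatmaps_values_py : Prop := ∀ (input_data : List (String × List (Int × List (String × Int)))) (advise_encoded_type : List Int), Dom_create_heatmaps_values_py input_data advise_encoded_type → Pre_create_heatmaps_values_py input_data advise_encoded_type → Spec_create_heatmaps_values_py input_data advise_encoded_type (create_heatmaps_values_py input_data advise_encoded_type)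

-- ===== LEMMAS AND PROOFS =====
def pvLook (run : List (Int × List (String × Int))) (t : Int) : Int :=
  PySem.Dict.getD (PySem.Dict.mk (PySem.Dict.getD (PySem.Dict.mk run) t [])) "count" 0

def pvStep (row : PySem.Dict Int Int) (c : Nat) (M : List (List Int))
    (ti : Int × List (String × Int)) : List (List Int) :=
  if row.contains ti.1 then
    M.set (row.getD ti.1 0).toNat
      ((M.getD (row.getD ti.1 0).toNat []).set c (PySem.Dict.getD (PySem.Dict.mk ti.2) "count" 0))
  else M

theorem pv_step_len (row : PySem.Dict Int Int) (c : Nat) (M : List (List Int)) (ti) :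
    (pvStep row c M ti).length = M.length := by
  unfold pvStep; split <;> simp

theorem pv_step_rowlen (row : PySem.Dict Int Int) (c : Nat) (M : List (List Int)) (ti) (r' : Nat) :
    ((pvStep row c M ti).getD r' []).length = (M.getD r' []).length := by
  unfold pvStep
  split
  · by_cases h : (row.getD ti.1 0).toNat = r'
    · subst h
      by_cases hlt : (row.getD ti.1 0).toNat < M.length
      · simp [List.getD_eq_getElem?_getD, hlt]
      · rw [List.getD_eq_getElem?_getD, List.getElem?_eq_none (by simpa using le_of_not_gt hlt)]
        rw [List.getD_eq_getElem?_getD, List.getElem?_eq_none (le_of_not_gt hlt)]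
    · simp [List.getD_eq_getElem?_getD, List.getElem?_set_ne h]
  · rfl

theorem pv_foldl_len (row : PySem.Dict Int Int) (c : Nat)
    (run : List (Int × List (String × Int))) (M : List (List Int)) :
    (run.foldl (pvStep row c) M).length = M.length := by
  induction run generalizing M with
  | nil => rfl
  | cons a l ih => simp only [List.foldl_cons]; rw [ih, pv_step_len]

theorem pv_foldl_rowlen (row : PySem.Dict Int Int) (c : Nat)
    (run : List (Int × List (String × Int))) (M : List (List Int)) (r' : Nat) :
    (((run.foldl (pvStep row c) M)).getD r' []).length = (M.getD r' []).length := by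
  induction run generalizing M with
  | nil => rfl
  | cons a l ih => simp only [List.foldl_cons]; rw [ih, pv_step_rowlen]

theorem pv_getD_mk_cons {ν : Type} (k t : Int) (v : ν) (rest : List (Int × ν)) (d : ν) :
    (PySem.Dict.mk ((k, v) :: rest)).getD t d = if k == t then v else (PySem.Dict.mk rest).getD t d := by
  rw [PySem.Dict.getD_eq_get?_getD, PySem.Dict.get?_mk_cons,
    PySem.Dict.getD_eq_get?_getD (PySem.Dict.mk rest)]
  by_cases h : k = t <;> simp [h]

theorem pv_contains_mk_cons {ν : Type} (k t : Int) (v : ν) (rest : List (Int × ν)) :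
    (PySem.Dict.mk ((k, v) :: rest)).contains t = (k == t || (PySem.Dict.mk rest).contains t) := by
  rw [PySem.Dict.contains_eq_isSome_get?, PySem.Dict.contains_eq_isSome_get?, PySem.Dict.get?_mk_cons]
  by_cases h : k = t <;> simp [h]

theorem pvLook_cons_ne (k t : Int) (v : List (String × Int)) (rest : List (Int × List (String × Int))) (h : k ≠ t) :
    pvLook ((k, v) :: rest) t = pvLook rest t := by
  unfold pvLook
  rw [pv_getD_mk_cons, if_neg (by simpa using h)]

theorem pvLook_cons_self (k : Int) (v : List (String × Int)) (rest : List (Int × List (String × Int))) :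
    pvLook ((k, v) :: rest) k = PySem.Dict.getD (PySem.Dict.mk v) "count" 0 := by
  unfold pvLook
  rw [pv_getD_mk_cons, if_pos (by simp)]

theorem pv_row_get? (l : List Int) (s : Int) (d : PySem.Dict Int Int) (hnd : l.Nodup) (t : Int) :
    ((PySem.List.enumerate l s).foldl (fun d it => d.insert it.2 it.1) d).get? t
      = if t ∈ l then some (s + l.idxOf t) else d.get? t := by
  induction l generalizing s d with
  | nil => simp
  | cons a l ih =>
    rw [PySem.List.enumerate_cons]
    simp only [List.foldl_cons]
    rw [ih _ _ hnd.of_cons]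
    by_cases ha : t = a
    · subst ha
      have hnl : t ∉ l := (List.nodup_cons.mp hnd).1
      simp [hnl, PySem.Dict.get?_insert_self]
    · by_cases hl : t ∈ l
      · simp [hl, ha, List.idxOf_cons_ne _ (fun h => ha h.symm)]
        ring
      · simp [hl, ha, PySem.Dict.get?_insert_of_ne _ _ ha]

theorem pv_inner (T : List Int) (row : PySem.Dict Int Int) (n : Nat)
    (hrowc : ∀ t, row.get? t = if t ∈ T then some ((T.idxOf t : Int)) else none)
    (hT : T.Nodup)
    (run : List (Int × List (String × Int))) (c : Nat) (M : List (List Int))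
    (hnd : (run.map Prod.fst).Nodup)
    (hlen : M.length = T.length)
    (hrowlen : ∀ r' < M.length, (M.getD r' []).length = n) (hc : c < n)
    (r : Nat) (hr : r < T.length) (c' : Nat) :
    ((run.foldl (pvStep row c) M).getD r []).getD c' 0 =
      if c' = c ∧ (PySem.Dict.mk run).contains (T[r]'hr) then pvLook run (T[r]'hr)
      else (M.getD r []).getD c' 0 := by
  induction run generalizing M with
  | nil =>
    simp [PySem.Dict.contains_eq_isSome_get?, PySem.Dict.get?]
  | cons kd tl ih =>
    obtain ⟨k, dd⟩ := kd
    simp only [List.map_cons, List.nodup_cons] at hnd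
    simp only [List.foldl_cons]
    have hlen' : (pvStep row c M (k, dd)).length = T.length := by rw [pv_step_len]; exact hlen
    have hrowlen' : ∀ r' < (pvStep row c M (k, dd)).length,
        ((pvStep row c M (k, dd)).getD r' []).length = n := by
      intro r' h; rw [pv_step_rowlen]; exact hrowlen r' (by rwa [pv_step_len] at h)
    rw [ih _ hnd.2 hlen' hrowlen']
    rw [pv_contains_mk_cons]
    by_cases hkT : k ∈ T
    · have hcont : row.contains k = true := by
        rw [PySem.Dict.contains_eq_isSome_get?, hrowc, if_pos hkT]; rfl
      have hgetD : (row.getD k 0).toNat = T.idxOf k := by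
        rw [PySem.Dict.getD_eq_get?_getD, hrowc, if_pos hkT]; simp
      have hidx : T.idxOf k < M.length := by rw [hlen]; exact List.idxOf_lt_length_of_mem hkT
      have hstep : pvStep row c M (k, dd) =
          M.set (T.idxOf k) ((M.getD (T.idxOf k) []).set c (PySem.Dict.getD (PySem.Dict.mk dd) "count" 0)) := by
        unfold pvStep; rw [if_pos hcont, hgetD]
      by_cases hk : k = T[r]'hr
      · -- head key is row r's type: the step writes cell (r, c); k does not recur in tl
        have hrk : T.idxOf k = r := by rw [hk]; exact List.Nodup.idxOf_getElem hT r hr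
        have hktl : (PySem.Dict.mk tl).contains (T[r]'hr) = false := by
          rw [← hk, PySem.Dict.contains_eq_decide_mem_keys]
          simp [PySem.Dict.keys]
          intro v hv
          exact hnd.1 (List.mem_map_of_mem (f := Prod.fst) hv)
        have hM' : ((pvStep row c M (k, dd)).getD r []) =
            (M.getD r []).set c (PySem.Dict.getD (PySem.Dict.mk dd) "count" 0) := by
          rw [hstep, hrk, List.getD_eq_getElem?_getD, List.getElem?_set_self (hrk ▸ hidx)]
          rfl
        rw [hktl, hM']
        by_cases hcc : c' = c
        · subst hcc
          have hclen : c' < (M.getD r []).length := by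
            rw [hrowlen r (by omega)]; exact hc
          rw [if_neg (by simp), if_pos ⟨rfl, by simp [hk]⟩]
          rw [List.getD_eq_getElem?_getD, List.getElem?_set_self hclen, ← hk, pvLook_cons_self]
          rfl
        · rw [if_neg (by simp [hcc]), if_neg (by simp [hcc])]
          rw [List.getD_eq_getElem?_getD, List.getElem?_set_ne (fun h => hcc h.symm),
            ← List.getD_eq_getElem?_getD]
      · -- head key belongs to a different row: row r is untouched by the step
        have hrk : T.idxOf k ≠ r := by
          intro h
          subst h
          exact hk (List.getElem_idxOf (List.idxOf_lt_length_of_mem hkT)).symm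
        have hM' : ((pvStep row c M (k, dd)).getD r []) = M.getD r [] := by
          rw [hstep, List.getD_eq_getElem?_getD, List.getElem?_set_ne hrk, ← List.getD_eq_getElem?_getD]
        have hck : (k == T[r]'hr) = false := by simp [hk]
        rw [hM', hck, pvLook_cons_ne k _ dd tl hk, Bool.false_or]
    · -- head key is not a selected type: the step is a no-op and the head is skipped
      have hcont : row.contains k = false := by
        rw [PySem.Dict.contains_eq_isSome_get?, hrowc, if_neg hkT]; rfl
      have hM' : pvStep row c M (k, dd) = M := by unfold pvStep; rw [if_neg (by simp [hcont])]
      have hk : k ≠ T[r]'hr := fun h => hkT (h ▸ List.getElem_mem hr)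
      have hck : (k == T[r]'hr) = false := by simp [hk]
      rw [hM', hck, pvLook_cons_ne k _ dd tl hk, Bool.false_or]

def pvCell (t : Int) (run : List (Int × List (String × Int))) : Int :=
  if (PySem.Dict.mk run).contains t then pvLook run t else 0

theorem pv_outer (T : List Int) (row : PySem.Dict Int Int) (n : Nat)
    (hrowc : ∀ t, row.get? t = if t ∈ T then some ((T.idxOf t : Int)) else none)
    (hT : T.Nodup)
    (runs : List (List (Int × List (String × Int)))) (s : Nat) (M : List (List Int))
    (hnds : ∀ run ∈ runs, (run.map Prod.fst).Nodup)
    (hlen : M.length = T.length)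
    (hrowlen : ∀ r' < M.length, (M.getD r' []).length = n)
    (hhigh : ∀ r' < M.length, ∀ c'', s ≤ c'' → ((M.getD r' []).getD c'' 0) = 0)
    (hsn : s + runs.length ≤ n)
    (r : Nat) (hr : r < T.length) (c' : Nat) :
    ((((PySem.List.enumerate runs (s : Int)).foldl
        (fun M ci => ci.2.foldl (pvStep row ci.1.toNat) M) M)).getD r []).getD c' 0
      = if s ≤ c' ∧ c' < s + runs.length then pvCell (T[r]'hr) (runs.getD (c' - s) [])
        else (M.getD r []).getD c' 0 := by
  induction runs generalizing s M with
  | nil =>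
    rw [if_neg (by simp only [List.length_nil]; omega)]
    rfl
  | cons run tl ih =>
    simp only [List.length_cons] at hsn
    rw [PySem.List.enumerate_cons]
    simp only [List.foldl_cons]
    have hcast : (s : Int) + 1 = ((s + 1 : Nat) : Int) := by push_cast; ring
    rw [hcast, Int.toNat_natCast]
    have hlen1 : (run.foldl (pvStep row s) M).length = M.length := pv_foldl_len _ _ _ _
    have hrowlen1 : ∀ r' < (run.foldl (pvStep row s) M).length,
        (((run.foldl (pvStep row s) M)).getD r' []).length = n := by
      intro r' h; rw [pv_foldl_rowlen]; exact hrowlen r' (by rwa [hlen1] at h)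
    have hinner : ∀ r'' (hr'' : r'' < T.length) c'',
        (((run.foldl (pvStep row s) M)).getD r'' []).getD c'' 0 =
          if c'' = s ∧ (PySem.Dict.mk run).contains (T[r'']'hr'') then pvLook run (T[r'']'hr'')
          else (M.getD r'' []).getD c'' 0 :=
      fun r'' hr'' c'' => pv_inner T row n hrowc hT run s M
        (hnds run (List.mem_cons_self)) hlen hrowlen (by omega) r'' hr'' c''
    have hhigh1 : ∀ r' < (run.foldl (pvStep row s) M).length, ∀ c'', s + 1 ≤ c'' →
        (((run.foldl (pvStep row s) M)).getD r' []).getD c'' 0 = 0 := by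
      intro r' h c'' hc''
      rw [hlen1, hlen] at h
      rw [hinner r' h c'', if_neg (by omega)]
      exact hhigh r' (by rw [hlen]; exact h) c'' (by omega)
    rw [ih (s + 1) _ (fun run h => hnds run (List.mem_cons_of_mem _ h))
      (hlen1.trans hlen) hrowlen1 hhigh1 (by omega)]
    by_cases h0 : c' = s
    · subst h0
      rw [if_neg (by omega), if_pos (by simp only [List.length_cons]; constructor <;> omega)]
      rw [hinner r hr _, hhigh r (by rw [hlen]; exact hr) _ le_rfl,
        show ∀ m : Nat, m - m = 0 from fun m => Nat.sub_self m]
      rw [List.getD_cons_zero]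
      by_cases hA : ((PySem.Dict.mk run).contains (T[r]'hr)) = true
      · rw [if_pos ⟨rfl, hA⟩]; unfold pvCell; rw [if_pos hA]
      · rw [if_neg (fun h => hA h.2)]; unfold pvCell; rw [if_neg hA]
    · by_cases h1 : s + 1 ≤ c' ∧ c' < (s + 1) + tl.length
      · rw [if_pos h1, if_pos (by simp only [List.length_cons]; omega)]
        have hsub : c' - s = (c' - (s + 1)) + 1 := by omega
        rw [hsub]
        rfl
      · rw [if_neg h1, if_neg (by simp only [List.length_cons]; omega),
          hinner r hr c', if_neg (by simp [h0])]

theorem pv_outer_len (row : PySem.Dict Int Int) (l : List (Int × List (Int × List (String × Int))))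
    (M : List (List Int)) :
    (l.foldl (fun M ci => ci.2.foldl (pvStep row ci.1.toNat) M) M).length = M.length := by
  induction l generalizing M with
  | nil => rfl
  | cons a tl ih => simp only [List.foldl_cons]; rw [ih, pv_foldl_len]

theorem pv_row_char (ats : List Int) (t : Int) :
    ((PySem.List.enumerate (PySem.Set.ofList ats) (0 : Int)).foldl
        (fun d it => d.insert it.2 it.1) (PySem.Dict.mk [])).get? t
      = if t ∈ PySem.Set.ofList ats then some (((PySem.Set.ofList ats).idxOf t : Int)) else none := by
  rw [pv_row_get? _ _ _ (PySem.Set.nodup_ofList ats) t]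
  split
  · simp
  · rfl

theorem pv_outer_rowlen (row : PySem.Dict Int Int) (l : List (Int × List (Int × List (String × Int))))
    (M : List (List Int)) (r' : Nat) :
    ((l.foldl (fun M ci => ci.2.foldl (pvStep row ci.1.toNat) M) M).getD r' []).length
      = (M.getD r' []).length := by
  induction l generalizing M with
  | nil => rfl
  | cons a tl ih => simp only [List.foldl_cons]; rw [ih, pv_foldl_rowlen]

theorem pv_main (input_data : List (String × List (Int × List (String × Int)))) (ats : List Int)
    (hpre : Pre_create_heatmaps_values_py input_data ats) :
    create_heatmaps_values_py input_data ats = create_heatmaps_values_py_alt input_data ats := by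
  have hT : (PySem.Set.ofList ats).Nodup := PySem.Set.nodup_ofList ats
  set T := PySem.Set.ofList ats with hTdef
  set n := input_data.length with hndef
  set runs := input_data.map Prod.snd with hrunsdef
  set row : PySem.Dict Int Int :=
    (PySem.List.enumerate T).foldl (fun d it => d.insert it.2 it.1) (PySem.Dict.mk []) with hrowdef
  set M0 : List (List Int) := T.map (fun _ => List.replicate n (0 : Int)) with hM0def
  have hrowc : ∀ t, row.get? t = if t ∈ T then some ((T.idxOf t : Int)) else none := by
    intro t; rw [hrowdef, hTdef]; exact pv_row_char ats t
  have hA : create_heatmaps_values_py input_data ats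
      = T.map (fun t => input_data.map (fun kv => pvCell t kv.2)) := by
    unfold create_heatmaps_values_py
    simp only [PySem.List.foldl_append_singleton_eq_map, List.nil_append]
    rfl
  have hB : create_heatmaps_values_py_alt input_data ats
      = (PySem.List.enumerate runs).foldl (fun M ci => ci.2.foldl (pvStep row ci.1.toNat) M) M0 := by
    rfl
  rw [hA, hB]
  have hM0len : M0.length = T.length := by rw [hM0def]; exact List.length_map ..
  have hrowlen0 : ∀ r' < M0.length, (M0.getD r' []).length = n := by
    intro r' h
    rw [hM0def] at h ⊢
    rw [List.getD_eq_getElem _ _ (by simpa using h), List.getElem_map]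
    exact List.length_replicate ..
  have hhigh0 : ∀ r' < M0.length, ∀ c'', 0 ≤ c'' → (M0.getD r' []).getD c'' 0 = 0 := by
    intro r' h c'' _
    rw [hM0def]
    simp only [List.getD_eq_getElem?_getD, List.getElem?_map]
    cases hg : T[r']? with
    | none => rfl
    | some w =>
      simp only [Option.map_some, Option.getD_some, List.getElem?_replicate]
      split <;> rfl
  have hnds : ∀ run ∈ runs, (run.map Prod.fst).Nodup := by
    intro run h
    rw [hrunsdef] at h
    obtain ⟨kv, hkv, rfl⟩ := List.mem_map.mp h
    exact (hpre kv hkv).1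
  have hrn : runs.length = n := by rw [hrunsdef, hndef]; exact List.length_map ..
  have hout := pv_outer T row n hrowc hT runs 0 M0 hnds hM0len hrowlen0 hhigh0 (by omega)
  simp only [Nat.cast_zero, Nat.zero_add, Nat.sub_zero] at hout
  have hlenB : (List.foldl (fun M ci => List.foldl (pvStep row ci.1.toNat) M ci.2) M0
      (PySem.List.enumerate runs)).length = T.length := by
    rw [pv_outer_len]; exact hM0len
  apply List.ext_getElem (by rw [hlenB]; exact List.length_map ..)
  intro r h1 h2
  have hrT : r < T.length := by rwa [hlenB] at h2
  rw [List.getElem_map]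
  rw [show (List.foldl (fun M ci => List.foldl (pvStep row ci.1.toNat) M ci.2) M0
      (PySem.List.enumerate runs))[r]'h2
    = (List.foldl (fun M ci => List.foldl (pvStep row ci.1.toNat) M ci.2) M0
      (PySem.List.enumerate runs)).getD r [] from (List.getD_eq_getElem _ _ h2).symm]
  have hrowlenB : ((List.foldl (fun M ci => List.foldl (pvStep row ci.1.toNat) M ci.2) M0
      (PySem.List.enumerate runs)).getD r []).length = n := by
    rw [pv_outer_rowlen]; exact hrowlen0 r (by rwa [hM0len])
  apply List.ext_getElem (by rw [hrowlenB, hndef]; exact List.length_map ..)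
  intro c hc1 hc2
  have hcn : c < n := by rwa [hrowlenB] at hc2
  rw [List.getElem_map]
  rw [show ((List.foldl (fun M ci => List.foldl (pvStep row ci.1.toNat) M ci.2) M0
      (PySem.List.enumerate runs)).getD r [])[c]'hc2
    = ((List.foldl (fun M ci => List.foldl (pvStep row ci.1.toNat) M ci.2) M0
      (PySem.List.enumerate runs)).getD r []).getD c 0 from (List.getD_eq_getElem _ _ hc2).symm]
  rw [hout r hrT c, if_pos ⟨Nat.zero_le c, by rwa [hrn]⟩]
  have hruns : runs.getD c [] = (input_data[c]'(by rwa [hndef] at hcn)).2 := by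
    rw [hrunsdef, List.getD_eq_getElem _ _ (by simpa using (hndef ▸ hcn)), List.getElem_map]
  rw [hruns]

-- ===== VERDICT (by name: the statement is the Claim_ definition above) =====
theorem create_heatmaps_values_py_spec : Claim_equal_create_heatmaps_values_py := by
  intro input_data ats _ hpre
  unfold Spec_create_heatmaps_values_py
  exact pv_main input_data ats hpre
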